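-- pv_equiv track=rewrite | github.com/AlvieSpurlock/MathCore | MathCore/MathTypes/Advanced/DiscreteMath.py | IsValidPartition
-- ===== SOURCE A (Python) =====
-- def AreDisjoint(A, B):
--     return len(set(A) & set(B)) == 0                           # Empty intersection → disjoint
--
-- def IsValidPartition(A, partition):
--     A = set(A)
--     union    = set()
--     for part in partition:
--         part = set(part)
--         if len(part) == 0:                                      # Empty part → not a valid partition
--             return False
--         if not AreDisjoint(union, part):                        # Overlapping parts → invalid
--             return False
--         union |= part
--     return union == A                                           # Must cover exactly A
-- ===== SOURCE B (Python) =====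
-- def IsValidPartition(A, partition):
--     # Aggregate check: count, over all parts (deduplicated), how often each
--     # element occurs; valid iff no part is empty, every count is exactly 1,
--     # and the counted elements are exactly the elements of A.
--     flat = [x for part in partition for x in dict.fromkeys(part)]
--     counts = {}
--     for x in flat:
--         counts[x] = counts.get(x, 0) + 1
--     return (all(len(part) > 0 for part in partition)
--             and all(c == 1 for c in counts.values())
--             and set(counts) == set(A))
-- ===== Notes on version B (the rewrite author's own statement) =====
-- stated objective: alternative
-- what changed: Replaces A's incremental loop (empty-check, disjointness test against the growing union, union update per part) by one global frequency count over the deduplicated parts, then three aggregate checks: no empty part, every count exactly 1, counted elements equal set(A).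
import Mathlib
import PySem

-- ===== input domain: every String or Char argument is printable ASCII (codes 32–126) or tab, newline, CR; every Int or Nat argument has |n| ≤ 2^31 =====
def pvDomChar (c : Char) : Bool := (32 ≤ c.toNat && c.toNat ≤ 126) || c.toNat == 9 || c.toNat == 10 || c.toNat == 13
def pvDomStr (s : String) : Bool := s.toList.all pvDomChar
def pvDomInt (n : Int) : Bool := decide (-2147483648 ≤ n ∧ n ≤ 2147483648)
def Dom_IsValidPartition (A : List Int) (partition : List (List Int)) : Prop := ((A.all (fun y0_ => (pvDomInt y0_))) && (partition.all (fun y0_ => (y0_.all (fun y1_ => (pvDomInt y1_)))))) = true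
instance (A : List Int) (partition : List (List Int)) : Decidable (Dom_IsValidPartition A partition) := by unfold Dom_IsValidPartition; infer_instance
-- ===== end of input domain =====

-- B replaces A's incremental disjoint-vs-union loop by one global frequency
-- count over the deduplicated parts plus aggregate checks (objective: alternative).

-- ===== PORT A =====
def AreDisjoint (A B : List Int) : Bool :=
  PySem.Set.len (PySem.Set.inter (PySem.Set.ofList A) (PySem.Set.ofList B)) == 0

-- the 'for part in partition' loop of A, with its two early returns
def pvALoop (Aset : PySem.Set Int) (union : PySem.Set Int) : List (List Int) → Bool
  | [] => PySem.Set.equal union Aset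
  | part :: rest =>
      let p := PySem.Set.ofList part
      if PySem.Set.len p == 0 then false
      else if !(AreDisjoint union p) then false
      else pvALoop Aset (PySem.Set.union union p) rest

def IsValidPartition (A : List Int) (partition : List (List Int)) : Bool :=
  pvALoop (PySem.Set.ofList A) PySem.Set.empty partition

-- ===== PORT B =====
def IsValidPartition_alt (A : List Int) (partition : List (List Int)) : Bool :=
  let flat := partition.flatMap (fun part => PySem.List.dedup part)
  let counts := PySem.Dict.counter flat
  (partition.all (fun part => decide (0 < part.length))) &&
  (counts.values.all (fun c => c == 1)) &&
  PySem.Set.equal counts.keys (PySem.Set.ofList A)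

-- ===== PRECONDITION & SPEC =====
def Spec_IsValidPartition (A : List Int) (partition : List (List Int)) (out : Bool) : Prop := out = IsValidPartition_alt A partition
instance (A : List Int) (partition : List (List Int)) (out : Bool) : Decidable (Spec_IsValidPartition A partition out) := by unfold Spec_IsValidPartition; infer_instance

-- ===== CLAIM (what is proved, stated in full; the proofs are below) =====
def Claim_equal_IsValidPartition : Prop := ∀ (A : List Int) (partition : List (List Int)), Dom_IsValidPartition A partition → Spec_IsValidPartition A partition (IsValidPartition A partition)

-- ===== LEMMAS AND PROOFS =====

-- the common characterisation both programs are proved equal to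
def pvFlat (partition : List (List Int)) : List Int :=
  partition.flatMap (fun part => PySem.Set.ofList part)

def pvGood (A : List Int) (partition : List (List Int)) : Prop :=
  (∀ p ∈ partition, p ≠ []) ∧ (pvFlat partition).Nodup ∧ (∀ x, x ∈ pvFlat partition ↔ x ∈ A)

lemma areDisjoint_iff (s t : List Int) :
    AreDisjoint s t = true ↔ ∀ x ∈ s, x ∉ t := by
  simp only [AreDisjoint, PySem.Set.len, beq_iff_eq, Nat.cast_eq_zero,
    List.length_eq_zero_iff, List.eq_nil_iff_forall_not_mem, PySem.Set.mem_inter,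
    PySem.Set.mem_ofList]
  constructor
  · intro h x hx hxt; exact h x ⟨hx, hxt⟩
  · rintro h x ⟨hx, hxt⟩; exact h x hx hxt

lemma aLoop_iff (Aset : PySem.Set Int) (parts : List (List Int)) :
    ∀ (union : List Int), union.Nodup →
    (pvALoop Aset union parts = true ↔
      (∀ p ∈ parts, p ≠ []) ∧ (union ++ pvFlat parts).Nodup ∧
        (∀ x, (x ∈ union ∨ x ∈ pvFlat parts) ↔ x ∈ Aset)) := by
  induction parts with
  | nil =>
      intro union hu
      simp [pvALoop, pvFlat, PySem.Set.equal_iff, hu]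
  | cons part rest ih =>
      intro union hu
      have hflat : pvFlat (part :: rest) = PySem.Set.ofList part ++ pvFlat rest := by
        simp [pvFlat]
      by_cases hpe : part = []
      · subst hpe
        simp [pvALoop, PySem.Set.len]
      · have hne : PySem.Set.ofList part ≠ [] := by
          intro h
          exact hpe (List.eq_nil_iff_forall_not_mem.mpr
            (fun x hx => by simpa [h] using (PySem.Set.mem_ofList part x).mpr hx))
        by_cases hdj : ∀ x ∈ union, x ∉ PySem.Set.ofList part
        · -- disjoint: the loop recurses with union ++ part's set
          have hAD : AreDisjoint union (PySem.Set.ofList part) = true :=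
            (areDisjoint_iff _ _).mpr hdj
          have hupd : PySem.Set.update union (PySem.Set.ofList part)
              = union ++ PySem.Set.ofList part :=
            PySem.Set.update_eq_append_of_disjoint union (PySem.Set.ofList part)
              (PySem.Set.nodup_ofList part) (fun x hx hxu => hdj x hxu hx)
          have hnd : (union ++ PySem.Set.ofList part).Nodup :=
            List.Nodup.append hu (PySem.Set.nodup_ofList part)
              (fun x hx hx' => hdj x hx hx')
          have hlen : (PySem.Set.len (PySem.Set.ofList part) == 0) = false := by
            simp [PySem.Set.len, List.length_eq_zero_iff, hne]
          rw [show pvALoop Aset union (part :: rest)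
              = pvALoop Aset (union ++ PySem.Set.ofList part) rest by
            simp [pvALoop, hne, hAD, PySem.Set.union, hupd]]
          rw [ih _ hnd]
          constructor
          · rintro ⟨h1, h2, h3⟩
            refine ⟨?_, ?_, fun x => ?_⟩
            · intro p hp
              rcases List.mem_cons.mp hp with hp | hp
              · exact hp ▸ hpe
              · exact h1 p hp
            · rw [hflat, ← List.append_assoc]; exact h2
            · rw [hflat]; rw [← h3 x]; simp [List.mem_append, or_assoc]
          · rintro ⟨h1, h2, h3⟩
            refine ⟨fun p hp => h1 p (List.mem_cons_of_mem _ hp), ?_, fun x => ?_⟩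
            · rw [hflat, ← List.append_assoc] at h2; exact h2
            · rw [← h3 x]; rw [hflat]; simp [List.mem_append, or_assoc]
        · -- overlap: the loop returns False, and Nodup fails on the right
          push Not at hdj
          obtain ⟨y, hyu, hyp⟩ := hdj
          have hAD : AreDisjoint union (PySem.Set.ofList part) = false := by
            rcases Bool.eq_false_or_eq_true (AreDisjoint union (PySem.Set.ofList part)) with h | h
            · exact absurd hyp ((areDisjoint_iff _ _).mp h y hyu)
            · exact h
          have hlen : (PySem.Set.len (PySem.Set.ofList part) == 0) = false := by
            simp [PySem.Set.len, List.length_eq_zero_iff, hne]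
          have : pvALoop Aset union (part :: rest) = false := by
            simp [pvALoop, hne, hAD]
          rw [this]
          simp only [Bool.false_eq_true, false_iff]
          rintro ⟨-, h2, -⟩
          rw [hflat] at h2
          have := (List.nodup_append.mp h2).2.2
          exact this y hyu y (by simp [hyp]) rfl

lemma a_iff (A : List Int) (partition : List (List Int)) :
    IsValidPartition A partition = true ↔ pvGood A partition := by
  rw [IsValidPartition, aLoop_iff _ _ PySem.Set.empty List.nodup_nil]
  unfold pvGood
  simp [PySem.Set.empty, PySem.Set.mem_ofList]

lemma b_iff (A : List Int) (partition : List (List Int)) :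
    IsValidPartition_alt A partition = true ↔ pvGood A partition := by
  unfold IsValidPartition_alt pvGood
  have hflat : partition.flatMap (fun part => PySem.List.dedup part) = pvFlat partition := by
    simp [pvFlat]
  rw [hflat]
  simp only [Bool.and_eq_true, List.all_eq_true, decide_eq_true_eq,
    PySem.Dict.values, PySem.Dict.items_counter, PySem.Dict.keys_counter,
    PySem.Set.equal_iff, PySem.Set.mem_ofList, List.map_map, Function.comp,
    List.mem_map, beq_iff_eq]
  constructor
  · rintro ⟨⟨h1, h2⟩, h3⟩
    refine ⟨fun p hp => by have := h1 p hp; intro h; simp [h] at this, ?_, h3⟩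
    rw [List.nodup_iff_count_eq_one]
    intro a ha
    have := h2 ((pvFlat partition).count a : Int)
      ⟨a, ha, rfl⟩
    exact_mod_cast this
  · rintro ⟨h1, h2, h3⟩
    refine ⟨⟨fun p hp => List.length_pos_of_ne_nil (h1 p hp), ?_⟩, h3⟩
    rintro c ⟨a, ha, rfl⟩
    have := List.nodup_iff_count_eq_one.mp h2 a ha
    exact_mod_cast this

-- ===== VERDICT (by name: the statement is the Claim_ definition above) =====
theorem IsValidPartition_spec : Claim_equal_IsValidPartition := by
  intro A partition _
  unfold Spec_IsValidPartition
  rw [Bool.eq_iff_iff, a_iff, b_iff]
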